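-- pv_equiv track=rewrite | github.com/R1A-29-30/Tinkoffinternshiptest | Homework.py | min_cost_to_make_valid
-- ===== SOURCE A (Python) =====
-- def min_cost_to_make_valid(a, b, s):
--     balance = 0
--     cost = 0
--     for ch in s:
--         if ch == '(':
--             balance += 1
--         else:
--             balance -= 1
--             if balance < 0:
--                 cost += min(a, 2 * b)
--                 balance = 0
--     cost += balance * b
--     return cost
-- ===== SOURCE B (Python) =====
-- def min_cost_to_make_valid(a, b, s):
--     # Normalize: A treats every non-'(' character as a closer.
--     t = ''.join('(' if ch == '(' else ')' for ch in s)
--     # Repeatedly cancel matched adjacent pairs until none remain.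
--     while '()' in t:
--         t = t.replace('()', '')
--     # Remainder is ')'*c + '('*o: each unmatched closer is fixed for
--     # min(a, 2*b) (flip it, or insert an opener), each unmatched opener for b.
--     return t.count(')') * min(a, 2 * b) + t.count('(') * b
-- ===== Notes on version B (the rewrite author's own statement) =====
-- stated objective: alternative
-- what changed: Replaces the single-pass charge-and-reset balance scan with repeated cancellation of adjacent '()' pairs (string rewriting via replace); the irreducible remainder ')'*c + '('*o yields cost c*min(a,2b) + o*b.
import Mathlib
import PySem

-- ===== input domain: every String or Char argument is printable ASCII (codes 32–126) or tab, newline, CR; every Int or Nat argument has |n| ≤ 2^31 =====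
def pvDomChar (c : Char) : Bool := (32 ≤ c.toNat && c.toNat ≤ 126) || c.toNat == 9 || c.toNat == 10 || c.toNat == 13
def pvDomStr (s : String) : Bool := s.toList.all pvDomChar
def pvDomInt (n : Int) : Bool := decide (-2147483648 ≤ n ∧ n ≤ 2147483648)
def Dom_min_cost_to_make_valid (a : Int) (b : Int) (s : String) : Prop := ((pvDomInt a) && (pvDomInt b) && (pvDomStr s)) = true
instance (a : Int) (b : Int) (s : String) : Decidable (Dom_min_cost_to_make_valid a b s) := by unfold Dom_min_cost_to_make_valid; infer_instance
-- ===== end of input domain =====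

-- B replaces A's single-pass charge-and-reset scan with repeated cancellation of adjacent '()' pairs
-- (string rewriting) and reads the cost off the irreducible remainder; return values proved equal.


-- ===== PORT A =====
-- A's loop state: (balance, cost); the ')'-branch resets balance to 0 and charges min(a, 2*b).
def pvStepA (a b : Int) (st : Int × Int) (ch : Char) : Int × Int :=
  if ch = '(' then (st.1 + 1, st.2)
  else
    let bal := st.1 - 1
    if bal < 0 then (0, st.2 + min a (2 * b)) else (bal, st.2)

def min_cost_to_make_valid (a : Int) (b : Int) (s : String) : Int :=
  let st := s.toList.foldl (pvStepA a b) (0, 0)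
  st.2 + st.1 * b

-- ===== PORT B =====
-- t.replace('()',''): remove the left-to-right non-overlapping occurrences of "()".
def pvOnePass : List Char → List Char
  | [] => []
  | [c] => [c]
  | c1 :: c2 :: rest =>
      if c1 = '(' ∧ c2 = ')' then pvOnePass rest else c1 :: pvOnePass (c2 :: rest)

-- '()' in t
def pvHasPair : List Char → Bool
  | [] => false
  | [_] => false
  | c1 :: c2 :: rest => (c1 = '(' && c2 = ')') || pvHasPair (c2 :: rest)

-- termination measure for the while-loop (cited by pvReduce's decreasing_by)
theorem pvOnePass_len_le (l : List Char) : (pvOnePass l).length ≤ l.length := by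
  induction l using pvOnePass.induct with
  | case1 => simp [pvOnePass]
  | case2 => simp [pvOnePass]
  | case3 c1 c2 rest hcond ih => simp only [pvOnePass, if_pos hcond, List.length_cons]; omega
  | case4 c1 c2 rest hcond ih =>
      simp only [pvOnePass, if_neg hcond, List.length_cons]
      simp only [List.length_cons] at ih
      omega

theorem pvOnePass_len_lt (l : List Char) (h : pvHasPair l = true) : (pvOnePass l).length < l.length := by
  induction l using pvOnePass.induct with
  | case1 => simp [pvHasPair] at h
  | case2 => simp [pvHasPair] at h
  | case3 c1 c2 rest hp ih =>
      simp only [pvOnePass, if_pos hp, List.length_cons]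
      have := pvOnePass_len_le rest
      omega
  | case4 c1 c2 rest hp ih =>
      simp only [pvOnePass, if_neg hp, List.length_cons]
      have hr : pvHasPair (c2 :: rest) = true := by
        simp only [pvHasPair, Bool.or_eq_true, Bool.and_eq_true, decide_eq_true_eq] at h
        rcases h with ⟨h1, h2⟩ | h
        · exact absurd ⟨h1, h2⟩ hp
        · exact h
      have hlen := ih hr
      simp only [List.length_cons] at hlen
      omega

-- the while-loop: cancel pairs until no "()" remains
def pvReduce (l : List Char) : List Char :=
  if h : pvHasPair l = true then pvReduce (pvOnePass l) else l
termination_by l.length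
decreasing_by exact pvOnePass_len_lt l h

def min_cost_to_make_valid_alt (a : Int) (b : Int) (s : String) : Int :=
  let t := s.toList.map (fun ch => if ch = '(' then '(' else ')')
  let r := pvReduce t
  (r.count ')' : Int) * min a (2 * b) + (r.count '(' : Int) * b

-- ===== PRECONDITION & SPEC =====
def Spec_min_cost_to_make_valid (a : Int) (b : Int) (s : String) (out : Int) : Prop := out = min_cost_to_make_valid_alt a b s
instance (a : Int) (b : Int) (s : String) (out : Int) : Decidable (Spec_min_cost_to_make_valid a b s out) := by unfold Spec_min_cost_to_make_valid; infer_instance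

-- ===== CLAIM (what is proved, stated in full; the proofs are below) =====
def Claim_equal_min_cost_to_make_valid : Prop := ∀ (a : Int) (b : Int) (s : String), Dom_min_cost_to_make_valid a b s → Spec_min_cost_to_make_valid a b s (min_cost_to_make_valid a b s)

-- ===== LEMMAS AND PROOFS =====

-- A's step keeps the balance nonnegative.
theorem pvStepA_nonneg (a b : Int) (st : Int × Int) (c : Char) (h : 0 ≤ st.1) :
    0 ≤ (pvStepA a b st c).1 := by
  obtain ⟨x, y⟩ := st
  have hx : (0:Int) ≤ x := h
  by_cases hc : c = '('
  · simp [pvStepA, hc]; omega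
  · simp only [pvStepA, if_neg hc]
    split_ifs with h2
    · simp
    · simp only at h2 ⊢; omega

-- A's fold ignores the normalization of non-'(' chars to ')'.
theorem foldA_map_norm (a b : Int) (l : List Char) (st : Int × Int) :
    (l.map (fun ch => if ch = '(' then '(' else ')')).foldl (pvStepA a b) st
      = l.foldl (pvStepA a b) st := by
  induction l generalizing st with
  | nil => rfl
  | cons c t ih =>
      simp only [List.map_cons, List.foldl_cons]
      rw [show pvStepA a b st (if c = '(' then '(' else ')') = pvStepA a b st c by
        by_cases hc : c = '(' <;> simp [pvStepA, hc]]
      exact ih _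

-- Removing an adjacent "()" pair does not change A's fold (needs balance ≥ 0).
theorem foldA_onePass (a b : Int) (l : List Char) (st : Int × Int) (h : 0 ≤ st.1) :
    (pvOnePass l).foldl (pvStepA a b) st = l.foldl (pvStepA a b) st := by
  induction l using pvOnePass.induct generalizing st with
  | case1 => rfl
  | case2 => rfl
  | case3 c1 c2 rest hp ih =>
      obtain ⟨h1, h2⟩ := hp
      subst h1 h2
      have hpair : pvStepA a b (pvStepA a b st '(') ')' = st := by
        obtain ⟨x, y⟩ := st
        have hx : (0:Int) ≤ x := h
        have h1 : pvStepA a b (x, y) '(' = (x + 1, y) := by simp [pvStepA]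
        have hc : ¬ ((')' : Char) = '(') := by decide
        rw [h1]
        simp only [pvStepA, if_neg hc]
        split_ifs with hlt
        · simp only at hlt; omega
        · simp only [Prod.mk.injEq]
          refine ⟨by omega, trivial⟩
      have hrw : pvOnePass ('(' :: ')' :: rest) = pvOnePass rest := by simp [pvOnePass]
      rw [hrw, ih st h, List.foldl_cons, List.foldl_cons, hpair]
  | case4 c1 c2 rest hp ih =>
      simp only [pvOnePass, if_neg hp, List.foldl_cons]
      exact ih _ (pvStepA_nonneg a b st c1 h)

-- The while-loop does not change A's fold.
theorem foldA_reduce (a b : Int) (l : List Char) (st : Int × Int) (h : 0 ≤ st.1) :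
    (pvReduce l).foldl (pvStepA a b) st = l.foldl (pvStepA a b) st := by
  induction l using pvReduce.induct with
  | case1 l hp ih => rw [pvReduce, dif_pos hp, ih, foldA_onePass a b l st h]
  | case2 l hp => rw [pvReduce, dif_neg hp]

-- pvOnePass and pvReduce only keep characters of the input.
theorem pvOnePass_mem (l : List Char) (c : Char) (h : c ∈ pvOnePass l) : c ∈ l := by
  induction l using pvOnePass.induct with
  | case1 => simpa [pvOnePass] using h
  | case2 => simpa [pvOnePass] using h
  | case3 c1 c2 rest hp ih =>
      simp only [pvOnePass, if_pos hp] at h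
      simp [ih h]
  | case4 c1 c2 rest hp ih =>
      simp only [pvOnePass, if_neg hp, List.mem_cons] at h
      rcases h with h | h
      · simp [h]
      · have := ih h
        simp only [List.mem_cons] at this ⊢
        tauto

theorem pvReduce_mem (l : List Char) (c : Char) (h : c ∈ pvReduce l) : c ∈ l := by
  induction l using pvReduce.induct with
  | case1 l hp ih =>
      rw [pvReduce, dif_pos hp] at h
      exact pvOnePass_mem l c (ih h)
  | case2 l hp => rwa [pvReduce, dif_neg hp] at h

-- The while-loop's result has no "()" left.
theorem pvReduce_noPair (l : List Char) : pvHasPair (pvReduce l) = false := by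
  induction l using pvReduce.induct with
  | case1 l hp ih => rw [pvReduce, dif_pos hp]; exact ih
  | case2 l hp => rw [pvReduce, dif_neg hp]; simpa using hp

theorem pvHasPair_cons_false (c : Char) (l : List Char) (h : pvHasPair (c :: l) = false) :
    pvHasPair l = false := by
  cases l with
  | nil => rfl
  | cons d t =>
      simp only [pvHasPair, Bool.or_eq_false_iff] at h
      exact h.2

-- A pair-free string of parentheses is ")"*nc ++ "("*no.
theorem pairfree_shape (r : List Char) (hp : pvHasPair r = false)
    (hm : ∀ c ∈ r, c = '(' ∨ c = ')') :
    ∃ nc no : Nat, r = List.replicate nc ')' ++ List.replicate no '(' := by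
  induction r with
  | nil => exact ⟨0, 0, rfl⟩
  | cons c rest ih =>
      obtain ⟨nc, no, hr⟩ := ih (pvHasPair_cons_false c rest hp) (fun d hd => hm d (List.mem_cons_of_mem c hd))
      rcases hm c (List.mem_cons_self) with hc | hc
      · subst hc
        cases nc with
        | zero => exact ⟨0, no + 1, by simp [hr, List.replicate_succ]⟩
        | succ n =>
            exfalso
            rw [hr] at hp
            simp [pvHasPair, List.replicate_succ] at hp
      · subst hc
        exact ⟨nc + 1, no, by simp [hr, List.replicate_succ]⟩

-- A's fold over the remainder shape.
theorem foldA_close (a b : Int) (nc : Nat) (k : Int) :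
    (List.replicate nc ')').foldl (pvStepA a b) (0, k) = (0, k + nc * min a (2 * b)) := by
  induction nc generalizing k with
  | zero => simp
  | succ n ih =>
      have hstep : pvStepA a b (0, k) ')' = (0, k + min a (2 * b)) := by
        have hc : ¬ ((')' : Char) = '(') := by decide
        norm_num [pvStepA, hc]
      rw [List.replicate_succ, List.foldl_cons, hstep, ih]
      simp only [Prod.mk.injEq, true_and]
      push_cast
      ring

theorem foldA_open (a b : Int) (no : Nat) (bal k : Int) :
    (List.replicate no '(').foldl (pvStepA a b) (bal, k) = (bal + no, k) := by
  induction no generalizing bal with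
  | zero => simp
  | succ n ih =>
      have hstep : pvStepA a b (bal, k) '(' = (bal + 1, k) := by
        norm_num [pvStepA]
      rw [List.replicate_succ, List.foldl_cons, hstep, ih]
      simp only [Prod.mk.injEq, and_true]
      push_cast
      ring

-- ===== VERDICT (by name: the statement is the Claim_ definition above) =====
theorem min_cost_to_make_valid_spec : Claim_equal_min_cost_to_make_valid := by
  intro a b s _
  unfold Spec_min_cost_to_make_valid
  have hmem : ∀ c ∈ pvReduce (s.toList.map (fun ch => if ch = '(' then '(' else ')')),
      c = '(' ∨ c = ')' := by
    intro c hc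
    have hm := pvReduce_mem _ c hc
    simp only [List.mem_map] at hm
    obtain ⟨d, _, hd⟩ := hm
    by_cases h : d = '('
    · left; rw [← hd]; simp [h]
    · right; rw [← hd]; simp [h]
  obtain ⟨nc, no, hshape⟩ := pairfree_shape _ (pvReduce_noPair _) hmem
  have hfold : s.toList.foldl (pvStepA a b) (0, 0) = ((no : Int), (nc : Int) * min a (2 * b)) := by
    rw [← foldA_map_norm a b s.toList (0, 0),
        ← foldA_reduce a b (s.toList.map (fun ch => if ch = '(' then '(' else ')')) (0, 0) (by norm_num),
        hshape, List.foldl_append, foldA_close, foldA_open]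
    norm_num
  have hA : min_cost_to_make_valid a b s
      = (s.toList.foldl (pvStepA a b) (0, 0)).2 + (s.toList.foldl (pvStepA a b) (0, 0)).1 * b := rfl
  have hB : min_cost_to_make_valid_alt a b s
      = ((pvReduce (s.toList.map (fun ch => if ch = '(' then '(' else ')'))).count ')' : Int) * min a (2 * b)
        + ((pvReduce (s.toList.map (fun ch => if ch = '(' then '(' else ')'))).count '(' : Int) * b := rfl
  rw [hA, hB, hfold, hshape]
  have h1 : (List.replicate nc ')' ++ List.replicate no '(').count ')' = nc := by
    simp [List.count_append, List.count_replicate]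
  have h2 : (List.replicate nc ')' ++ List.replicate no '(').count '(' = no := by
    simp [List.count_append, List.count_replicate]
  rw [h1, h2]
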